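-- pv_equiv track=rewrite | github.com/yoyoyo150/jvmonitor | envs/cursor/my_keiba/JVLinkToSQLite-0.1.2/JVLinkToSQLiteArtifact/tools/excel_aliases.py | build_header_map
-- ===== SOURCE A (Python) =====
-- import unicodedata
-- from typing import Dict, List, Optional, Tuple
--
-- def _nfkc(s: str) -> str:
--     return unicodedata.normalize("NFKC", s).strip()
--
-- def build_header_map(df_columns: List[str], aliases: Dict[str, List[str]]) -> Dict[str, Optional[str]]:
--     cols_nfkc = [_nfkc(c) for c in map(str, df_columns)]
--     result: Dict[str, Optional[str]] = {}
--     for logical, names in aliases.items():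
--         found = None
--         # strict match
--         for cand in names:
--             if cand in cols_nfkc:
--                 found = df_columns[cols_nfkc.index(cand)]
--                 break
--         # case-insensitive / contains
--         if not found:
--             for cand in names:
--                 for i, c in enumerate(cols_nfkc):
--                     if c.lower() == cand.lower():
--                         found = df_columns[i]
--                         break
--                 if found:
--                     break
--         if not found:
--             for cand in names:
--                 for i, c in enumerate(cols_nfkc):
--                     if c.startswith(cand) or cand in c:
--                         found = df_columns[i]
--                         break
--                 if found:
--                     break
--         result[logical] = found
--     return result
-- ===== SOURCE B (Python) =====
-- import unicodedata
-- from typing import Dict, List, Optional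
--
--
-- def _nfkc(s: str) -> str:
--     return unicodedata.normalize("NFKC", s).strip()
--
--
-- def _tier(cand: str, col: str) -> Optional[int]:
--     """Rank of a (candidate, column) match: 0 exact, 1 case-insensitive,
--     2 substring (a prefix is a substring), None if no match."""
--     if col == cand:
--         return 0
--     if col.lower() == cand.lower():
--         return 1
--     if cand in col:
--         return 2
--     return None
--
--
-- def build_header_map(df_columns: List[str], aliases: Dict[str, List[str]]) -> Dict[str, Optional[str]]:
--     cols = [_nfkc(c) for c in map(str, df_columns)]
--     result: Dict[str, Optional[str]] = {}
--     for logical, names in aliases.items():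
--         keys = [(t, ci, coli)
--                 for ci, cand in enumerate(names)
--                 for coli, c in enumerate(cols)
--                 if (t := _tier(cand, c)) is not None]
--         result[logical] = df_columns[min(keys)[2]] if keys else None
--     return result
-- ===== Notes on version B (the rewrite author's own statement) =====
-- stated objective: alternative
-- what changed: B replaces A's three staged fallback passes (exact, then case-insensitive, then substring, each rescanning candidates and columns with break/truthiness control flow) by a single ranking scheme: every (candidate, column) pair is given a lexicographic key (match-tier, candidate-index, column-index) and the answer is the column of the minimal key; Pre_ excludes df_columns containing the empty string, on which A's truthiness-driven fall-through (a matched empty column counts as no match and a later pass may override it) is an accidental corner.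
-- outside the precondition, e.g. on build_header_map(['', 'a'], {'x': ['', 'a']}): A returns {'x': 'a'}, B returns {'x': ''}; on build_header_map([''], {'x': ['']}): A returns {'x': ''}, B returns {'x': ''}
import Mathlib
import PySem

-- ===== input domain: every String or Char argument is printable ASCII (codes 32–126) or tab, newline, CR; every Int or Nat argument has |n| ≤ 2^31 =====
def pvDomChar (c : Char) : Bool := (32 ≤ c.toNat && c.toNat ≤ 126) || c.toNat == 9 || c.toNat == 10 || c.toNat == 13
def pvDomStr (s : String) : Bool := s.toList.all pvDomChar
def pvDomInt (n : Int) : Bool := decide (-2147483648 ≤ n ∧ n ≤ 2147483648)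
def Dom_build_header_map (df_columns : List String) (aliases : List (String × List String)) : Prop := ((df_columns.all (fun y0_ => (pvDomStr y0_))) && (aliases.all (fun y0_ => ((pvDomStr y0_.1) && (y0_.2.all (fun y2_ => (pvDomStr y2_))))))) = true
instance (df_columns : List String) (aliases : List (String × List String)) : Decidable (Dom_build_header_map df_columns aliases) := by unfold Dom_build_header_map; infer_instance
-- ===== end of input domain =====

-- B replaces A's three staged fallback passes by one ranking scheme: every (candidate, column)
-- pair gets a lexicographic key (match-tier, candidate-index, column-index) and the answer is the
-- column of the minimal key; objective: alternative (same asymptotic cost).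

-- ===== PORT A =====
-- _nfkc: NFKC normalization is the identity on the ASCII input domain, so only .strip() remains (exact on Dom)
def pyNfkc (s : String) : String := PySem.Str.strip s

-- Python truthiness of `found : Optional[str]` (`if not found` / `if found`)
def pyTruthy : Option String → Bool
  | none => false
  | some s => !(s == "")

-- inner scan `for i, c in enumerate(cols_nfkc): if test(c): found = df_columns[i]; break` (A's 2nd/3rd passes)
def scanInner (test : String → Bool) (df_columns : List String) : List (Int × String) → Option String
  | [] => none
  | (i, c) :: rest => if test c then PySem.List.pyGet? df_columns i else scanInner test df_columns rest

-- A's third pass (`c.startswith(cand) or cand in c`)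
def subPass (cols_nfkc df_columns : List String) (found : Option String) : List String → Option String
  | [] => found
  | cand :: rest =>
    match scanInner (fun c => PySem.Str.startswith c cand || PySem.Str.isIn cand c) df_columns (PySem.List.enumerate cols_nfkc 0) with
    | some s => if pyTruthy (some s) then some s else subPass cols_nfkc df_columns (some s) rest
    | none => subPass cols_nfkc df_columns found rest

-- A's strict pass: `if cand in cols_nfkc: found = df_columns[cols_nfkc.index(cand)]; break`
def strictA (cols_nfkc df_columns : List String) : List String → Option String
  | [] => none
  | cand :: rest =>
    if cols_nfkc.contains cand then
      PySem.List.pyGet? df_columns (((PySem.List.index? cols_nfkc cand).getD 0 : Nat) : Int)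
    else strictA cols_nfkc df_columns rest

-- A's case-insensitive pass: inner scan on c.lower() == cand.lower(), `if found: break`
def ciPassA (cols_nfkc df_columns : List String) (found : Option String) : List String → Option String
  | [] => found
  | cand :: rest =>
    match scanInner (fun c => PySem.Str.lower c == PySem.Str.lower cand) df_columns (PySem.List.enumerate cols_nfkc 0) with
    | some s => if pyTruthy (some s) then some s else ciPassA cols_nfkc df_columns (some s) rest
    | none => ciPassA cols_nfkc df_columns found rest

def build_header_map (df_columns : List String) (aliases : List (String × List String)) : List (String × Option String) :=
  let cols_nfkc := df_columns.map pyNfkc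
  (aliases.foldl (fun result la =>
    let f1 := strictA cols_nfkc df_columns la.2
    let f2 := if pyTruthy f1 then f1 else ciPassA cols_nfkc df_columns f1 la.2
    let f3 := if pyTruthy f2 then f2 else subPass cols_nfkc df_columns f2 la.2
    result.insert la.1 f3) PySem.Dict.empty).items

-- ===== PORT B =====
-- _tier: rank of a (candidate, column) match — 0 exact, 1 case-insensitive, 2 substring, none otherwise
def tierB (cand c : String) : Option Int :=
  if c == cand then some 0
  else if PySem.Str.lower c == PySem.Str.lower cand then some 1
  else if PySem.Str.isIn cand c then some 2
  else none

-- lexicographic `<` on the (tier, candidate-index, column-index) key tuples (Python tuple comparison)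
def lexLt (a b : Int × Int × Int) : Bool :=
  a.1 < b.1 || (a.1 == b.1 && (a.2.1 < b.2.1 || (a.2.1 == b.2.1 && a.2.2 < b.2.2)))

-- Python's builtin min over the key list (keys are pairwise distinct, so the minimum is unique)
def minKey : List (Int × Int × Int) → Option (Int × Int × Int)
  | [] => none
  | k :: t =>
    match minKey t with
    | none => some k
    | some m => if lexLt m k then some m else some k

-- the key-list comprehension over enumerate(names) × enumerate(cols)
def keysB (cols names : List String) : List (Int × Int × Int) :=
  (PySem.List.enumerate names 0).flatMap (fun ci =>
    (PySem.List.enumerate cols 0).filterMap (fun cj =>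
      (tierB ci.2 cj.2).map (fun t => (t, ci.1, cj.1))))

def build_header_map_alt (df_columns : List String) (aliases : List (String × List String)) : List (String × Option String) :=
  let cols := df_columns.map pyNfkc
  (aliases.foldl (fun result la =>
    let v := match minKey (keysB cols la.2) with
      | some k => PySem.List.pyGet? df_columns k.2.2   -- `df_columns[min(keys)[2]]`; the index is always in range here
      | none => none
    result.insert la.1 v) PySem.Dict.empty).items

-- ===== PRECONDITION & SPEC =====
-- Pre_ excludes df_columns containing the empty string: there A's truthiness-driven fall-through
-- (a matched empty column counts as no match and a later pass may override it) is an accidental corner.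
def Pre_build_header_map (df_columns : List String) (aliases : List (String × List String)) : Prop :=
  "" ∉ df_columns
instance (df_columns : List String) (aliases : List (String × List String)) : Decidable (Pre_build_header_map df_columns aliases) := by unfold Pre_build_header_map; infer_instance

def pvWitness_build_header_map : List String × (List (String × List String)) :=
  (["Name", " AGE "], [("name", ["name", "Name"]), ("age", ["Age", "AGE"]), ("sex", ["Sex"])])

def Spec_build_header_map (df_columns : List String) (aliases : List (String × List String)) (out : List (String × Option String)) : Prop := out = build_header_map_alt df_columns aliases
instance (df_columns : List String) (aliases : List (String × List String)) (out : List (String × Option String)) : Decidable (Spec_build_header_map df_columns aliases out) := by unfold Spec_build_header_map; infer_instance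

-- ===== CLAIM (what is proved, stated in full; the proofs are below) =====
def Claim_equal_build_header_map : Prop := ∀ (df_columns : List String) (aliases : List (String × List String)), Dom_build_header_map df_columns aliases → Pre_build_header_map df_columns aliases → Spec_build_header_map df_columns aliases (build_header_map df_columns aliases)

-- ===== LEMMAS AND PROOFS =====

-- index (counted from j) of the first column satisfying p
def firstIdx (p : String → Bool) : List String → Int → Option Int
  | [], _ => none
  | c :: cs, j => if p c then some j else firstIdx p cs (j + 1)

-- first candidate (index counted from n) that has a matching column, with its first matching column index
def candIdxE (T : String → String → Bool) (cols : List String) : List String → Int → Option (Int × Int)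
  | [], _ => none
  | cand :: rest, n =>
    match firstIdx (T cand) cols 0 with
    | some j => some (n, j)
    | none => candIdxE T cols rest (n + 1)

def eqT (cand c : String) : Bool := c == cand
def ciT (cand c : String) : Bool := PySem.Str.lower c == PySem.Str.lower cand
def subT (cand c : String) : Bool := PySem.Str.isIn cand c

-- staged specification of the minimal key
def specK (cols names : List String) (n : Int) : Option (Int × Int × Int) :=
  match candIdxE eqT cols names n with
  | some p => some (0, p.1, p.2)
  | none =>
    match candIdxE ciT cols names n with
    | some p => some (1, p.1, p.2)
    | none => (candIdxE subT cols names n).map (fun p => (2, p.1, p.2))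

-- generalized key list with candidate indices starting at n
def gKeys (cols names : List String) (n : Int) : List (Int × Int × Int) :=
  (PySem.List.enumerate names n).flatMap (fun ci =>
    (PySem.List.enumerate cols 0).filterMap (fun cj =>
      (tierB ci.2 cj.2).map (fun t => (t, ci.1, cj.1))))

-- one candidate's keys, columns enumerated from j
def hKeys (cand : String) (n : Int) (cols : List String) (j : Int) : List (Int × Int × Int) :=
  (PySem.List.enumerate cols j).filterMap (fun cj => (tierB cand cj.2).map (fun t => (t, n, cj.1)))

def mergeK : Option (Int × Int × Int) → Option (Int × Int × Int) → Option (Int × Int × Int)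
  | none, r => r
  | some a, none => some a
  | some a, some b => if lexLt b a then some b else some a

def blendK (n : Int) (o0 o1 o2 : Option Int) : Option (Int × Int × Int) :=
  match o0 with
  | some j => some (0, n, j)
  | none =>
    match o1 with
    | some j => some (1, n, j)
    | none => o2.map (fun j => (2, n, j))

lemma lexLt_iff (a1 a2 a3 b1 b2 b3 : Int) :
    lexLt (a1, a2, a3) (b1, b2, b3) = true ↔
      (a1 < b1 ∨ (a1 = b1 ∧ (a2 < b2 ∨ (a2 = b2 ∧ a3 < b3)))) := by
  simp [lexLt]

lemma lexLt_false_iff (a1 a2 a3 b1 b2 b3 : Int) :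
    lexLt (a1, a2, a3) (b1, b2, b3) = false ↔
      ¬(a1 < b1 ∨ (a1 = b1 ∧ (a2 < b2 ∨ (a2 = b2 ∧ a3 < b3)))) := by
  rw [← lexLt_iff]
  exact Bool.eq_false_iff

lemma minKey_append (L R : List (Int × Int × Int)) :
    minKey (L ++ R) = mergeK (minKey L) (minKey R) := by
  induction L with
  | nil => rfl
  | cons k t ih =>
    simp only [List.cons_append, minKey, ih]
    cases ht : minKey t with
    | none =>
      cases hr : minKey R with
      | none => rfl
      | some r => rfl
    | some m =>
      cases hr : minKey R with
      | none =>
        by_cases h : lexLt m k = true <;> simp [mergeK, h]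
      | some r =>
        obtain ⟨m1, m2, m3⟩ := m
        obtain ⟨r1, r2, r3⟩ := r
        obtain ⟨k1, k2, k3⟩ := k
        simp only [mergeK]
        cases h1 : lexLt (r1, r2, r3) (m1, m2, m3) <;>
        cases h2 : lexLt (m1, m2, m3) (k1, k2, k3) <;>
        cases h3 : lexLt (r1, r2, r3) (k1, k2, k3) <;>
          simp only [h1, h2, h3, Bool.false_eq_true, if_false, if_true] <;>
          first
            | rfl
            | (exfalso
               simp only [lexLt_iff, lexLt_false_iff] at h1 h2 h3
               omega)

lemma firstIdx_none_iff (p : String → Bool) :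
    ∀ (cols : List String) (j : Int), firstIdx p cols j = none ↔ ∀ c ∈ cols, p c = false := by
  intro cols
  induction cols with
  | nil => intro j; simp [firstIdx]
  | cons c cs ih =>
    intro j
    simp only [firstIdx]
    by_cases h : p c = true
    · simp [h]
    · simp only [Bool.not_eq_true] at h
      simp [h, ih (j + 1)]

lemma firstIdx_congr_mem {p q : String → Bool} :
    ∀ (cols : List String), (∀ c ∈ cols, p c = q c) →
      ∀ (j : Int), firstIdx p cols j = firstIdx q cols j := by
  intro cols
  induction cols with
  | nil => intro _ _; rfl
  | cons c cs ih =>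
    intro h j
    simp only [firstIdx]
    rw [h c (List.mem_cons_self ..)]
    by_cases hq : q c = true
    · simp [hq]
    · simp only [Bool.not_eq_true] at hq
      simp [hq, ih (fun x hx => h x (List.mem_cons_of_mem _ hx)) (j + 1)]

lemma firstIdx_bound {p : String → Bool} :
    ∀ (cols : List String) (j i : Int), firstIdx p cols j = some i →
      j ≤ i ∧ i < j + cols.length := by
  intro cols
  induction cols with
  | nil => intro j i h; simp [firstIdx] at h
  | cons c cs ih =>
    intro j i h
    simp only [firstIdx] at h
    by_cases hp : p c = true
    · rw [if_pos hp] at h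
      have : j = i := by simpa using h
      subst this
      simp only [List.length_cons]
      omega
    · rw [if_neg hp] at h
      have := ih (j + 1) i h
      simp only [List.length_cons]
      omega

lemma candIdxE_bound {T : String → String → Bool} {cols : List String} :
    ∀ (names : List String) (n : Int) (p : Int × Int), candIdxE T cols names n = some p →
      n ≤ p.1 ∧ 0 ≤ p.2 ∧ p.2 < cols.length := by
  intro names
  induction names with
  | nil => intro n p h; simp [candIdxE] at h
  | cons cand rest ih =>
    intro n p h
    simp only [candIdxE] at h
    cases hf : firstIdx (T cand) cols 0 with
    | some j =>
      rw [hf] at h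
      have hb := firstIdx_bound cols 0 j hf
      have : (n, j) = p := by simpa using h
      subst this
      simp only []
      omega
    | none =>
      rw [hf] at h
      have := ih (n + 1) p h
      omega

lemma tierB_cases {cand c : String} {t : Int} (h : tierB cand c = some t) :
    t = 0 ∨ t = 1 ∨ t = 2 := by
  unfold tierB at h
  split_ifs at h <;> simp_all

lemma tier0_pred (cand c : String) : (tierB cand c == some 0) = eqT cand c := by
  unfold tierB eqT
  split_ifs with h1 h2 h3 <;> simp [h1]

lemma tier1_pred (cand c : String) (h : eqT cand c = false) :
    (tierB cand c == some 1) = ciT cand c := by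
  unfold eqT at h
  unfold tierB ciT
  simp only [h, Bool.false_eq_true, if_false]
  split_ifs with h2 h3 <;> simp [h2]

lemma tier2_pred (cand c : String) (h0 : eqT cand c = false) (h1 : ciT cand c = false) :
    (tierB cand c == some 2) = subT cand c := by
  unfold eqT at h0
  unfold ciT at h1
  unfold tierB subT
  rw [h0, h1]
  cases h3 : PySem.Str.isIn cand c <;> simp

lemma blendK_cases {n : Int} {o0 o1 o2 : Option Int} {m : Int × Int × Int}
    (h : blendK n o0 o1 o2 = some m) :
    (∃ j, o0 = some j ∧ m = (0, n, j)) ∨ (∃ j, o1 = some j ∧ m = (1, n, j)) ∨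
      (∃ j, o2 = some j ∧ m = (2, n, j)) := by
  cases o0 with
  | some j =>
    simp only [blendK] at h
    exact Or.inl ⟨j, rfl, (Option.some.inj h).symm⟩
  | none =>
    cases o1 with
    | some j =>
      simp only [blendK] at h
      exact Or.inr (Or.inl ⟨j, rfl, (Option.some.inj h).symm⟩)
    | none =>
      cases o2 with
      | some j =>
        simp only [blendK, Option.map_some] at h
        exact Or.inr (Or.inr ⟨j, rfl, (Option.some.inj h).symm⟩)
      | none => simp [blendK] at h

lemma minKey_cons_of_min (k : Int × Int × Int) (L : List (Int × Int × Int))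
    (h : ∀ m, minKey L = some m → lexLt m k = false) :
    minKey (k :: L) = some k := by
  simp only [minKey]
  cases hm : minKey L with
  | none => rfl
  | some m => simp [h m hm]

lemma minKey_cons_of_lt (k m : Int × Int × Int) (L : List (Int × Int × Int))
    (hm : minKey L = some m) (h : lexLt m k = true) :
    minKey (k :: L) = some m := by
  simp only [minKey, hm, h, if_true]

lemma hKeys_cons (cand : String) (n : Int) (c : String) (cs : List String) (j : Int) :
    hKeys cand n (c :: cs) j
      = match (tierB cand c).map (fun t => (t, n, j)) with
        | none => hKeys cand n cs (j + 1)
        | some b => b :: hKeys cand n cs (j + 1) := by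
  cases h : tierB cand c <;>
    simp [hKeys, PySem.List.enumerate_cons, h]

lemma hKeys_min (cand : String) (n : Int) :
    ∀ (cs : List String) (j : Int),
      minKey (hKeys cand n cs j)
        = blendK n (firstIdx (fun c => tierB cand c == some 0) cs j)
                   (firstIdx (fun c => tierB cand c == some 1) cs j)
                   (firstIdx (fun c => tierB cand c == some 2) cs j) := by
  intro cs
  induction cs with
  | nil =>
    intro j
    simp [hKeys, PySem.List.enumerate_nil, minKey, firstIdx, blendK]
  | cons c cs ih =>
    intro j
    rw [hKeys_cons]
    cases h : tierB cand c with
    | none =>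
      have hp0 : (tierB cand c == some 0) = false := by simp [h]
      have hp1 : (tierB cand c == some 1) = false := by simp [h]
      have hp2 : (tierB cand c == some 2) = false := by simp [h]
      simp only [Option.map_none, firstIdx, hp0, hp1, hp2, Bool.false_eq_true, if_false]
      exact ih (j + 1)
    | some t =>
      rcases tierB_cases h with rfl | rfl | rfl
      · -- tier 0 at column j
        have hp0 : (tierB cand c == some 0) = true := by simp [h]
        simp only [Option.map_some, firstIdx, hp0, if_true]
        have hmin : ∀ m, minKey (hKeys cand n cs (j + 1)) = some m →
            lexLt m (0, n, j) = false := by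
          intro m hm
          rw [ih (j + 1)] at hm
          rcases blendK_cases hm with ⟨j', hj', rfl⟩ | ⟨j', hj', rfl⟩ | ⟨j', hj', rfl⟩
          · have hb := firstIdx_bound cs (j + 1) j' hj'
            rw [lexLt_false_iff]; omega
          · rw [lexLt_false_iff]; omega
          · rw [lexLt_false_iff]; omega
        rw [minKey_cons_of_min _ _ hmin]
        simp [blendK]
      · -- tier 1 at column j
        have hp0 : (tierB cand c == some 0) = false := by simp [h]
        have hp1 : (tierB cand c == some 1) = true := by simp [h]
        simp only [Option.map_some, firstIdx, hp0, hp1, Bool.false_eq_true, if_false, if_true]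
        cases hf0 : firstIdx (fun c => tierB cand c == some 0) cs (j + 1) with
        | some j0 =>
          have hm : minKey (hKeys cand n cs (j + 1)) = some (0, n, j0) := by
            rw [ih (j + 1), hf0]; simp [blendK]
          have hlt : lexLt (0, n, j0) (1, n, j) = true := by rw [lexLt_iff]; omega
          rw [minKey_cons_of_lt _ _ _ hm hlt]
          simp [blendK]
        | none =>
          have hmin : ∀ m, minKey (hKeys cand n cs (j + 1)) = some m →
              lexLt m (1, n, j) = false := by
            intro m hm
            rw [ih (j + 1)] at hm
            rcases blendK_cases hm with ⟨j', hj', rfl⟩ | ⟨j', hj', rfl⟩ | ⟨j', hj', rfl⟩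
            · rw [hf0] at hj'; exact absurd hj' (by simp)
            · have hb := firstIdx_bound cs (j + 1) j' hj'
              rw [lexLt_false_iff]; omega
            · rw [lexLt_false_iff]; omega
          rw [minKey_cons_of_min _ _ hmin]
          simp [blendK]
      · -- tier 2 at column j
        have hp0 : (tierB cand c == some 0) = false := by simp [h]
        have hp1 : (tierB cand c == some 1) = false := by simp [h]
        have hp2 : (tierB cand c == some 2) = true := by simp [h]
        simp only [Option.map_some, firstIdx, hp0, hp1, hp2, Bool.false_eq_true, if_false, if_true]
        cases hf0 : firstIdx (fun c => tierB cand c == some 0) cs (j + 1) with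
        | some j0 =>
          have hm : minKey (hKeys cand n cs (j + 1)) = some (0, n, j0) := by
            rw [ih (j + 1), hf0]; simp [blendK]
          have hlt : lexLt (0, n, j0) (2, n, j) = true := by rw [lexLt_iff]; omega
          rw [minKey_cons_of_lt _ _ _ hm hlt]
          simp [blendK]
        | none =>
          cases hf1 : firstIdx (fun c => tierB cand c == some 1) cs (j + 1) with
          | some j1 =>
            have hm : minKey (hKeys cand n cs (j + 1)) = some (1, n, j1) := by
              rw [ih (j + 1), hf0, hf1]; simp [blendK]
            have hlt : lexLt (1, n, j1) (2, n, j) = true := by rw [lexLt_iff]; omega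
            rw [minKey_cons_of_lt _ _ _ hm hlt]
            simp [blendK]
          | none =>
            have hmin : ∀ m, minKey (hKeys cand n cs (j + 1)) = some m →
                lexLt m (2, n, j) = false := by
              intro m hm
              rw [ih (j + 1)] at hm
              rcases blendK_cases hm with ⟨j', hj', rfl⟩ | ⟨j', hj', rfl⟩ | ⟨j', hj', rfl⟩
              · rw [hf0] at hj'; exact absurd hj' (by simp)
              · rw [hf1] at hj'; exact absurd hj' (by simp)
              · have hb := firstIdx_bound cs (j + 1) j' hj'
                rw [lexLt_false_iff]; omega
            rw [minKey_cons_of_min _ _ hmin]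
            simp [blendK]

lemma gKeys_cons (cols : List String) (cand : String) (rest : List String) (n : Int) :
    gKeys cols (cand :: rest) n = hKeys cand n cols 0 ++ gKeys cols rest (n + 1) := by
  simp only [gKeys, hKeys, PySem.List.enumerate_cons, List.flatMap_cons]

lemma specK_bound {cols names : List String} {n : Int} {m : Int × Int × Int}
    (h : specK cols names n = some m) : n ≤ m.2.1 ∧ 0 ≤ m.1 := by
  unfold specK at h
  cases h0 : candIdxE eqT cols names n with
  | some p =>
    rw [h0] at h
    have hb := candIdxE_bound names n p h0
    have : (0, p.1, p.2) = m := Option.some.inj h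
    subst this
    exact ⟨hb.1, le_refl 0⟩
  | none =>
    rw [h0] at h
    cases h1 : candIdxE ciT cols names n with
    | some p =>
      rw [h1] at h
      have hb := candIdxE_bound names n p h1
      have : (1, p.1, p.2) = m := Option.some.inj h
      subst this
      exact ⟨hb.1, by omega⟩
    | none =>
      rw [h1] at h
      cases h2 : candIdxE subT cols names n with
      | some p =>
        rw [h2] at h
        have hb := candIdxE_bound names n p h2
        have : (2, p.1, p.2) = m := by simpa using h
        subst this
        exact ⟨hb.1, by omega⟩
      | none => rw [h2] at h; simp at h

lemma main_min (cols : List String) :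
    ∀ (names : List String) (n : Int), minKey (gKeys cols names n) = specK cols names n := by
  intro names
  induction names with
  | nil =>
    intro n
    simp [gKeys, PySem.List.enumerate_nil, minKey, specK, candIdxE]
  | cons cand rest ih =>
    intro n
    rw [gKeys_cons, minKey_append, hKeys_min cand n cols 0, ih (n + 1)]
    have e0 : firstIdx (fun c => tierB cand c == some 0) cols 0 = firstIdx (eqT cand) cols 0 :=
      firstIdx_congr_mem cols (fun c _ => tier0_pred cand c) 0
    rw [e0]
    cases hf0 : firstIdx (eqT cand) cols 0 with
    | some j =>
      have hw : candIdxE eqT cols (cand :: rest) n = some (n, j) := by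
        simp [candIdxE, hf0]
      have hspec : specK cols (cand :: rest) n = some (0, n, j) := by
        simp [specK, hw]
      rw [hspec]
      cases hr : specK cols rest (n + 1) with
      | none => rfl
      | some m =>
        obtain ⟨hb1, hb2⟩ := specK_bound hr
        obtain ⟨m1, m2, m3⟩ := m
        have hlt : lexLt (m1, m2, m3) (0, n, j) = false := by
          rw [lexLt_false_iff]
          simp only [] at hb1 hb2
          omega
        simp [blendK, mergeK, hlt]
    | none =>
      have hall0 : ∀ c ∈ cols, eqT cand c = false := (firstIdx_none_iff _ cols 0).1 hf0
      have e1 : firstIdx (fun c => tierB cand c == some 1) cols 0 = firstIdx (ciT cand) cols 0 :=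
        firstIdx_congr_mem cols (fun c hc => tier1_pred cand c (hall0 c hc)) 0
      have hw0 : candIdxE eqT cols (cand :: rest) n = candIdxE eqT cols rest (n + 1) := by
        simp [candIdxE, hf0]
      rw [e1]
      cases hf1 : firstIdx (ciT cand) cols 0 with
      | some j =>
        have hw1 : candIdxE ciT cols (cand :: rest) n = some (n, j) := by
          simp [candIdxE, hf1]
        cases h0r : candIdxE eqT cols rest (n + 1) with
        | some p =>
          have hspec : specK cols (cand :: rest) n = some (0, p.1, p.2) := by
            simp [specK, hw0, h0r]
          have hrest : specK cols rest (n + 1) = some (0, p.1, p.2) := by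
            simp [specK, h0r]
          rw [hspec, hrest]
          have hlt : lexLt (0, p.1, p.2) (1, n, j) = true := by rw [lexLt_iff]; omega
          simp [blendK, mergeK, hlt]
        | none =>
          cases h1r : candIdxE ciT cols rest (n + 1) with
          | some q =>
            have hb := candIdxE_bound rest (n + 1) q h1r
            have hspec : specK cols (cand :: rest) n = some (1, n, j) := by
              simp [specK, hw0, h0r, hw1]
            have hrest : specK cols rest (n + 1) = some (1, q.1, q.2) := by
              simp [specK, h0r, h1r]
            rw [hspec, hrest]
            have hlt : lexLt (1, q.1, q.2) (1, n, j) = false := by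
              rw [lexLt_false_iff]; omega
            simp [blendK, mergeK, hlt]
          | none =>
            cases h2r : candIdxE subT cols rest (n + 1) with
            | some q2 =>
              have hspec : specK cols (cand :: rest) n = some (1, n, j) := by
                simp [specK, hw0, h0r, hw1]
              have hrest : specK cols rest (n + 1) = some (2, q2.1, q2.2) := by
                simp [specK, h0r, h1r, h2r]
              rw [hspec, hrest]
              have hlt : lexLt (2, q2.1, q2.2) (1, n, j) = false := by
                rw [lexLt_false_iff]; omega
              simp [blendK, mergeK, hlt]
            | none =>
              have hspec : specK cols (cand :: rest) n = some (1, n, j) := by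
                simp [specK, hw0, h0r, hw1]
              have hrest : specK cols rest (n + 1) = none := by
                simp [specK, h0r, h1r, h2r]
              rw [hspec, hrest]
              rfl
      | none =>
        have hall1 : ∀ c ∈ cols, ciT cand c = false := (firstIdx_none_iff _ cols 0).1 hf1
        have e2 : firstIdx (fun c => tierB cand c == some 2) cols 0 = firstIdx (subT cand) cols 0 :=
          firstIdx_congr_mem cols (fun c hc => tier2_pred cand c (hall0 c hc) (hall1 c hc)) 0
        have hw1 : candIdxE ciT cols (cand :: rest) n = candIdxE ciT cols rest (n + 1) := by
          simp [candIdxE, hf1]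
        rw [e2]
        cases hf2 : firstIdx (subT cand) cols 0 with
        | some j =>
          have hw2 : candIdxE subT cols (cand :: rest) n = some (n, j) := by
            simp [candIdxE, hf2]
          cases h0r : candIdxE eqT cols rest (n + 1) with
          | some p =>
            have hspec : specK cols (cand :: rest) n = some (0, p.1, p.2) := by
              simp [specK, hw0, h0r]
            have hrest : specK cols rest (n + 1) = some (0, p.1, p.2) := by
              simp [specK, h0r]
            rw [hspec, hrest]
            have hlt : lexLt (0, p.1, p.2) (2, n, j) = true := by rw [lexLt_iff]; omega
            simp [blendK, mergeK, hlt]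
          | none =>
            cases h1r : candIdxE ciT cols rest (n + 1) with
            | some q =>
              have hspec : specK cols (cand :: rest) n = some (1, q.1, q.2) := by
                simp [specK, hw0, h0r, hw1, h1r]
              have hrest : specK cols rest (n + 1) = some (1, q.1, q.2) := by
                simp [specK, h0r, h1r]
              rw [hspec, hrest]
              have hlt : lexLt (1, q.1, q.2) (2, n, j) = true := by rw [lexLt_iff]; omega
              simp [blendK, mergeK, hlt]
            | none =>
              cases h2r : candIdxE subT cols rest (n + 1) with
              | some q2 =>
                have hb := candIdxE_bound rest (n + 1) q2 h2r
                have hspec : specK cols (cand :: rest) n = some (2, n, j) := by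
                  simp [specK, hw0, h0r, hw1, h1r, hw2]
                have hrest : specK cols rest (n + 1) = some (2, q2.1, q2.2) := by
                  simp [specK, h0r, h1r, h2r]
                rw [hspec, hrest]
                have hlt : lexLt (2, q2.1, q2.2) (2, n, j) = false := by
                  rw [lexLt_false_iff]; omega
                simp [blendK, mergeK, hlt]
              | none =>
                have hspec : specK cols (cand :: rest) n = some (2, n, j) := by
                  simp [specK, hw0, h0r, hw1, h1r, hw2]
                have hrest : specK cols rest (n + 1) = none := by
                  simp [specK, h0r, h1r, h2r]
                rw [hspec, hrest]
                rfl
        | none =>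
          have hw2 : candIdxE subT cols (cand :: rest) n = candIdxE subT cols rest (n + 1) := by
            simp [candIdxE, hf2]
          have hspec : specK cols (cand :: rest) n = specK cols rest (n + 1) := by
            simp [specK, hw0, hw1, hw2]
          rw [hspec]
          rfl

-- ===== A-side characterizations =====

lemma scanInner_firstIdx (test : String → Bool) (df : List String) :
    ∀ (cols : List String) (j : Int),
      scanInner test df (PySem.List.enumerate cols j)
        = match firstIdx test cols j with
          | some i => PySem.List.pyGet? df i
          | none => none := by
  intro cols
  induction cols with
  | nil => intro j; simp [PySem.List.enumerate_nil, scanInner, firstIdx]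
  | cons c cs ih =>
    intro j
    rw [PySem.List.enumerate_cons]
    simp only [scanInner, firstIdx]
    by_cases h : test c = true
    · simp [h]
    · simp only [Bool.not_eq_true] at h
      simp [h, ih (j + 1)]

lemma firstIdx_index (cand : String) :
    ∀ (cols : List String) (j : Int),
      firstIdx (eqT cand) cols j
        = (PySem.List.index? cols cand).map (fun i : Nat => (i : Int) + j) := by
  intro cols
  induction cols with
  | nil =>
    intro j
    simp only [firstIdx]
    rw [show PySem.List.index? ([] : List String) cand = none from rfl]
    rfl
  | cons c ct ih =>
    intro j
    by_cases hc : c = cand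
    · subst hc
      rw [PySem.List.index?_cons_self]
      simp [firstIdx, eqT]
    · have h1 : eqT cand c = false := by simp [eqT, hc]
      simp only [firstIdx, h1, Bool.false_eq_true, if_false]
      rw [PySem.List.index?_cons_of_ne _ hc, ih (j + 1)]
      cases hx : PySem.List.index? ct cand with
      | none => rfl
      | some i =>
        simp only [Option.map_some]
        congr 1
        push_cast
        ring

lemma strictA_char (cols df : List String) :
    ∀ (names : List String) (n : Int),
      strictA cols df names
        = (candIdxE eqT cols names n).bind (fun p => PySem.List.pyGet? df p.2) := by
  intro names
  induction names with
  | nil => intro n; rfl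
  | cons cand rest ih =>
    intro n
    simp only [strictA, candIdxE]
    rw [firstIdx_index cand cols 0]
    cases hx : PySem.List.index? cols cand with
    | some i =>
      have hmem : cand ∈ cols := (PySem.List.index?_isSome_iff cols cand).1 (by rw [hx]; rfl)
      have hm : cols.contains cand = true := by simpa using hmem
      rw [if_pos hm]
      simp only [Option.map_some, Option.getD_some]
      norm_num
    | none =>
      have hmem : cand ∉ cols := (PySem.List.index?_eq_none_iff cols cand).1 hx
      have hm : ¬ cols.contains cand = true := by simpa using hmem
      rw [if_neg hm]
      exact ih (n + 1)

lemma pyGet?_truthy {df : List String} (hne : ∀ v ∈ df, v ≠ "") {i : Int}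
    (h0 : 0 ≤ i) (h1 : i < df.length) :
    ∃ v, PySem.List.pyGet? df i = some v ∧ pyTruthy (some v) = true := by
  have hlt : i.toNat < df.length := by omega
  refine ⟨df[i.toNat], PySem.List.pyGet?_eq_some_getElem df h0 h1, ?_⟩
  have hv : df[i.toNat] ≠ "" := hne _ (List.getElem_mem hlt)
  simp [pyTruthy, hv]

lemma ciPassA_char (cols df : List String) (hlen : cols.length ≤ df.length)
    (hne : ∀ v ∈ df, v ≠ "") :
    ∀ (names : List String) (n : Int),
      ciPassA cols df none names
        = (candIdxE ciT cols names n).bind (fun p => PySem.List.pyGet? df p.2) := by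
  intro names
  induction names with
  | nil => intro n; rfl
  | cons cand rest ih =>
    intro n
    simp only [ciPassA, candIdxE]
    have ht : (fun c => PySem.Str.lower c == PySem.Str.lower cand) = ciT cand := rfl
    rw [ht, scanInner_firstIdx (ciT cand) df cols 0]
    cases hf : firstIdx (ciT cand) cols 0 with
    | some i =>
      have hb := firstIdx_bound cols 0 i hf
      obtain ⟨v, hv, htr⟩ := pyGet?_truthy (i := i) hne (by omega) (by omega)
      simp [hv, htr]
    | none => simpa using ih (n + 1)

-- a prefix is a substring, so A's third-pass test is B's substring test
lemma startswith_or_isIn (c cand : String) :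
    (PySem.Str.startswith c cand || PySem.Str.isIn cand c) = PySem.Str.isIn cand c := by
  cases h : PySem.Str.startswith c cand
  · simp
  · simp only [Bool.true_or]
    have hp : cand.toList <+: c.toList := by
      rw [PySem.Str.startswith] at h
      unfold PySem.Chars.startswith at h
      exact List.isPrefixOf_iff_prefix.mp h
    rw [PySem.Str.isIn]
    exact ((PySem.Chars.isIn_iff_infix _ _).mpr hp.isInfix).symm

lemma subPass_char (cols df : List String) (hlen : cols.length ≤ df.length)
    (hne : ∀ v ∈ df, v ≠ "") :
    ∀ (names : List String) (n : Int),
      subPass cols df none names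
        = (candIdxE subT cols names n).bind (fun p => PySem.List.pyGet? df p.2) := by
  intro names
  induction names with
  | nil => intro n; rfl
  | cons cand rest ih =>
    intro n
    simp only [subPass, candIdxE]
    have ht : (fun c => PySem.Str.startswith c cand || PySem.Str.isIn cand c) = subT cand := by
      funext c
      exact startswith_or_isIn c cand
    rw [ht, scanInner_firstIdx (subT cand) df cols 0]
    cases hf : firstIdx (subT cand) cols 0 with
    | some i =>
      have hb := firstIdx_bound cols 0 i hf
      obtain ⟨v, hv, htr⟩ := pyGet?_truthy (i := i) hne (by omega) (by omega)
      simp [hv, htr]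
    | none => simpa using ih (n + 1)

lemma perLogical (cols df : List String) (hlen : cols.length ≤ df.length)
    (hne : ∀ v ∈ df, v ≠ "") (names : List String) :
    (if pyTruthy (if pyTruthy (strictA cols df names) then strictA cols df names
          else ciPassA cols df (strictA cols df names) names) then
        (if pyTruthy (strictA cols df names) then strictA cols df names
          else ciPassA cols df (strictA cols df names) names)
      else subPass cols df
        (if pyTruthy (strictA cols df names) then strictA cols df names
          else ciPassA cols df (strictA cols df names) names) names)
    = match minKey (keysB cols names) with
      | some k => PySem.List.pyGet? df k.2.2
      | none => none := by
  have hkeys : keysB cols names = gKeys cols names 0 := rfl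
  rw [hkeys, main_min cols names 0, strictA_char cols df names 0]
  cases h0 : candIdxE eqT cols names 0 with
  | some p =>
    obtain ⟨hb1, hb2, hb3⟩ := candIdxE_bound names 0 p h0
    obtain ⟨v, hv, htr⟩ := pyGet?_truthy (i := p.2) hne hb2 (by omega)
    have hbind : (some p).bind (fun q => PySem.List.pyGet? df q.2) = PySem.List.pyGet? df p.2 :=
      rfl
    have hspec : specK cols names 0 = some (0, p.1, p.2) := by simp [specK, h0]
    rw [hbind, hspec]
    simp [htr, hv]
  | none =>
    have hbind : (Option.bind (none : Option (Int × Int))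
        (fun q => PySem.List.pyGet? df q.2)) = none := rfl
    rw [hbind]
    rw [show pyTruthy none = false from rfl]
    simp only [Bool.false_eq_true, if_false]
    rw [ciPassA_char cols df hlen hne names 0]
    cases h1 : candIdxE ciT cols names 0 with
    | some q =>
      obtain ⟨hb1, hb2, hb3⟩ := candIdxE_bound names 0 q h1
      obtain ⟨v, hv, htr⟩ := pyGet?_truthy (i := q.2) hne hb2 (by omega)
      have hbind1 : (some q).bind (fun r => PySem.List.pyGet? df r.2) = PySem.List.pyGet? df q.2 :=
        rfl
      have hspec : specK cols names 0 = some (1, q.1, q.2) := by simp [specK, h0, h1]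
      rw [hbind1, hspec]
      simp [htr, hv]
    | none =>
      rw [hbind]
      rw [show pyTruthy none = false from rfl]
      simp only [Bool.false_eq_true, if_false]
      rw [subPass_char cols df hlen hne names 0]
      cases h2 : candIdxE subT cols names 0 with
      | some r =>
        have hspec : specK cols names 0 = some (2, r.1, r.2) := by simp [specK, h0, h1, h2]
        rw [hspec]
        rfl
      | none =>
        have hspec : specK cols names 0 = none := by simp [specK, h0, h1, h2]
        rw [hspec]
        rfl

-- ===== VERDICT (by name: the statement is the Claim_ definition above) =====
theorem build_header_map_spec : Claim_equal_build_header_map := by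
  intro df aliases _ hpre
  unfold Spec_build_header_map build_header_map build_header_map_alt
  have hne : ∀ v ∈ df, v ≠ "" := fun v hv he => hpre (he ▸ hv)
  have hlen : (df.map pyNfkc).length ≤ df.length := by simp
  dsimp only
  congr 1
  apply PySem.List.foldl_congr_mem
  intro acc la _
  congr 1
  exact perLogical (df.map pyNfkc) df hlen hne la.2
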